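-- pv_equiv track=rewrite | github.com/A-lass/Algorithm-Study | baekjoon/17305.py | solve
-- ===== SOURCE A (Python) =====
-- def solve(n, m, three, five):
--     pSumThree = [0]
--     pSumFive = [0]
--
--     for w, num in three:
--         pSumThree.append(pSumThree[-1] + num)
--     for w, num in five:
--         pSumFive.append(pSumFive[-1] + num)
--
--     ans = 0
--
--     for cnt in range(len(pSumThree)):
--         if cnt * 3 > m: break
--         availableFiveCount = min((m - cnt * 3) // 5, len(pSumFive) - 1)
--         ans = max(ans, pSumThree[cnt] + pSumFive[availableFiveCount])
--
--     return ans
-- ===== SOURCE B (Python) =====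
-- def solve(n, m, three, five):
--     # No prefix-sum arrays and no closed-form division: keep a running sum of
--     # taken threes and the remaining budget, and recompute the five-side
--     # contribution for each count by a direct budget-consuming scan of `five`.
--     ans = 0
--     acc = 0
--     budget = m
--     k = 0
--     while budget >= 0:
--         total = acc
--         b = budget
--         for w, num in five:
--             if b < 5:
--                 break
--             total += num
--             b -= 5
--         if total > ans:
--             ans = total
--         if k == len(three):
--             break
--         acc += three[k][1]
--         budget -= 3
--         k += 1
--     return ans
-- ===== Notes on version B (the rewrite author's own statement) =====
-- stated objective: alternative
-- what changed: B abandons the two prefix-sum arrays and the closed-form min/floor-division index entirely: it carries a running three-sum and the remaining budget, and for every count recomputes the five-side contribution by scanning the five list, consuming 5 budget per item until the budget runs out (recomputation instead of precomputation).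
import Mathlib
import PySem

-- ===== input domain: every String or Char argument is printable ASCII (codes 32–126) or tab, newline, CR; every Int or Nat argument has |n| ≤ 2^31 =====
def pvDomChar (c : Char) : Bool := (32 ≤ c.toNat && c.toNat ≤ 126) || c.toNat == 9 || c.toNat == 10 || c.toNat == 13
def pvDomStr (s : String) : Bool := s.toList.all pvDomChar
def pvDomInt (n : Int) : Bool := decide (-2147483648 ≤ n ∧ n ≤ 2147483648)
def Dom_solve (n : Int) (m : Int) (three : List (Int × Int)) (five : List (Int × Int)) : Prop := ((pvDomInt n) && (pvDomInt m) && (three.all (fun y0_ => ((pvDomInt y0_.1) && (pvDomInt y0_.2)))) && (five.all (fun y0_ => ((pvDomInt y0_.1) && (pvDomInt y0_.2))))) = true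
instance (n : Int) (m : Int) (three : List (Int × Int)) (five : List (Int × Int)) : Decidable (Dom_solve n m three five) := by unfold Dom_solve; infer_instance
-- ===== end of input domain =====

-- B drops A's two prefix-sum arrays and closed-form min/floor-division index: it keeps a running
-- three-sum and remaining budget and recomputes the five contribution by a budget-consuming scan
-- of the five list per count (recomputation instead of precomputation); alternative, not faster.

-- ===== PORT A =====
-- A: build both prefix-sum lists, then loop over range(len(pSumThree)) with a break,
-- computing the five index by min((m - cnt*3)//5, len(pSumFive)-1) each iteration.
def solveLoopA (m : Int) (pt pf : List Int) : List Int → Int → Int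
  | [], ans => ans
  | cnt :: rest, ans =>
    if cnt * 3 > m then ans
    else
      let afc := min (PySem.Int.floordiv (m - cnt * 3) 5) ((pf.length : Int) - 1)
      solveLoopA m pt pf rest (max ans (PySem.List.pyGetD pt cnt 0 + PySem.List.pyGetD pf afc 0))

def solve (n : Int) (m : Int) (three : List (Int × Int)) (five : List (Int × Int)) : Int :=
  let pSumThree := three.foldl (fun acc p => acc ++ [PySem.List.pyGetD acc (-1) 0 + p.2]) [(0 : Int)]
  let pSumFive := five.foldl (fun acc p => acc ++ [PySem.List.pyGetD acc (-1) 0 + p.2]) [(0 : Int)]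
  solveLoopA m pSumThree pSumFive (PySem.List.pyRange 0 (pSumThree.length : Int) 1) 0

-- ===== PORT B =====
-- B's inner 'for w, num in five: if b < 5: break; total += num; b -= 5'
def fiveScan : Int → List (Int × Int) → Int
  | _, [] => 0
  | b, x :: rest => if b < 5 then 0 else x.2 + fiveScan (b - 5) rest

-- B's outer 'while budget >= 0' loop; it advances through `three` (at most len(three)+1 rounds).
def loopB (five : List (Int × Int)) : List (Int × Int) → Int → Int → Int → Int
  | [], budget, acc, ans =>
      if budget < 0 then ans
      else
        let total := acc + fiveScan budget five
        if total > ans then total else ans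
  | x :: rest, budget, acc, ans =>
      if budget < 0 then ans
      else
        let total := acc + fiveScan budget five
        loopB five rest (budget - 3) (acc + x.2) (if total > ans then total else ans)

def solve_alt (n : Int) (m : Int) (three : List (Int × Int)) (five : List (Int × Int)) : Int :=
  loopB five three m 0 0

-- ===== PRECONDITION & SPEC =====
def Spec_solve (n : Int) (m : Int) (three : List (Int × Int)) (five : List (Int × Int)) (out : Int) : Prop := out = solve_alt n m three five
instance (n : Int) (m : Int) (three : List (Int × Int)) (five : List (Int × Int)) (out : Int) : Decidable (Spec_solve n m three five out) := by unfold Spec_solve; infer_instance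

-- ===== CLAIM (what is proved, stated in full; the proofs are below) =====
def Claim_equal_solve : Prop := ∀ (n : Int) (m : Int) (three : List (Int × Int)) (five : List (Int × Int)), Dom_solve n m three five → Spec_solve n m three five (solve n m three five)

-- ===== LEMMAS AND PROOFS =====

-- the mathematical contents of A's prefix lists: pSum = 0 :: prefList xs 0
def prefList : List (Int × Int) → Int → List Int
  | [], _ => []
  | x :: r, s => (s + x.2) :: prefList r (s + x.2)

theorem prefList_length (xs : List (Int × Int)) : ∀ s, (prefList xs s).length = xs.length := by
  induction xs with
  | nil => intro s; rfl
  | cons x r ih => intro s; simp [prefList, ih]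

theorem foldA_eq (xs : List (Int × Int)) : ∀ (acc : List Int) (s : Int) (h : acc ≠ []),
    acc.getLast h = s →
    xs.foldl (fun a p => a ++ [PySem.List.pyGetD a (-1) 0 + p.2]) acc = acc ++ prefList xs s := by
  induction xs with
  | nil => intro acc s h hs; simp [prefList]
  | cons x r ih =>
    intro acc s h hs
    simp only [List.foldl, prefList]
    rw [PySem.List.pyGetD_neg_one acc 0 h, hs]
    rw [ih (acc ++ [s + x.2]) (s + x.2) (by simp) (by simp)]
    simp

theorem get_pref (xs : List (Int × Int)) : ∀ (s : Int) (k : Nat), k ≤ xs.length →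
    PySem.List.pyGetD (s :: prefList xs s) (k : Int) 0 = s + ((xs.map Prod.snd).take k).sum := by
  induction xs with
  | nil =>
    intro s k hk
    simp only [List.length_nil, Nat.le_zero] at hk
    subst hk
    simp [prefList]
  | cons x r ih =>
    intro s k hk
    cases k with
    | zero => simp
    | succ k =>
      have := ih (s + x.2) k (by simpa using hk)
      rw [PySem.List.pyGetD_natCast] at *
      simp only [prefList, List.map_cons, List.take_succ_cons, List.sum_cons]
      simpa [List.getD, add_assoc] using this

theorem fiveScan_take (xs : List (Int × Int)) : ∀ (b : Int), 0 ≤ b →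
    fiveScan b xs
      = ((xs.map Prod.snd).take (min (PySem.Int.floordiv b 5) (xs.length : Int)).toNat).sum := by
  induction xs with
  | nil =>
    intro b hb
    simp [fiveScan]
  | cons x r ih =>
    intro b hb
    rw [PySem.Int.floordiv_eq_ediv_of_pos (by norm_num)]
    by_cases h5 : b < 5
    · have h0 : (min (b / 5) ((r.length : Int) + 1)).toNat = 0 := by omega
      simp [fiveScan, h5, h0]
    · have hrec := ih (b - 5) (by omega)
      rw [PySem.Int.floordiv_eq_ediv_of_pos (by norm_num)] at hrec
      have hstep : (min (b / 5) (((x :: r).length : Int))).toNat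
          = (min ((b - 5) / 5) ((r.length : Int))).toNat + 1 := by
        simp only [List.length_cons]
        push_cast
        omega
      simp only [fiveScan, if_neg h5, hstep, List.map_cons, List.take_succ_cons, List.sum_cons]
      rw [hrec]

theorem loop_eq (m : Int) (three five : List (Int × Int)) :
    ∀ (rest : List (Int × Int)) (cnt : Nat) (ans : Int),
      three.drop cnt = rest → cnt ≤ three.length →
      solveLoopA m ((0 : Int) :: prefList three 0) ((0 : Int) :: prefList five 0)
          (PySem.List.pyRange (cnt : Int) ((((0 : Int) :: prefList three 0)).length : Int) 1) ans
        = loopB five rest (m - 3 * cnt)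
            (PySem.List.pyGetD ((0 : Int) :: prefList three 0) (cnt : Int) 0) ans := by
  set pt := (0 : Int) :: prefList three 0 with hpt
  set pf := (0 : Int) :: prefList five 0 with hpf
  have hptlen : (pt.length : Int) = (three.length : Int) + 1 := by
    simp [hpt, prefList_length]
  have hpflen : (pf.length : Int) = (five.length : Int) + 1 := by
    simp [hpf, prefList_length]
  have hget : ∀ k : Nat, k ≤ three.length →
      PySem.List.pyGetD pt (k : Int) 0 = ((three.map Prod.snd).take k).sum := by
    intro k hk
    rw [hpt, get_pref three 0 k hk, zero_add]
  have hcand : ∀ b : Int, 0 ≤ b →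
      PySem.List.pyGetD pf (min (PySem.Int.floordiv b 5) ((pf.length : Int) - 1)) 0
        = fiveScan b five := by
    intro b hb
    have h0 : 0 ≤ PySem.Int.floordiv b 5 := by
      rw [PySem.Int.floordiv_eq_ediv_of_pos (by norm_num)]; omega
    have hafc0 : 0 ≤ min (PySem.Int.floordiv b 5) ((pf.length : Int) - 1) := by
      rw [hpflen]; omega
    have hcast : min (PySem.Int.floordiv b 5) ((pf.length : Int) - 1)
        = (((min (PySem.Int.floordiv b 5) ((five.length : Int))).toNat : Nat) : Int) := by
      rw [hpflen] at *; omega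
    rw [hcast, hpf, get_pref five 0 _ (by rw [hpflen] at *; omega), zero_add,
        fiveScan_take five b hb]
  intro rest
  induction rest with
  | nil =>
    intro cnt ans hdrop hle
    have hcnt : cnt = three.length := by
      have := List.drop_eq_nil_iff.mp hdrop
      omega
    have hcons : PySem.List.pyRange (cnt : Int) (pt.length : Int) 1
        = (cnt : Int) :: PySem.List.pyRange ((cnt : Int) + 1) (pt.length : Int) 1 := by
      exact PySem.List.pyRange_one_cons (by rw [hptlen]; omega)
    have hnil : PySem.List.pyRange ((cnt : Int) + 1) (pt.length : Int) 1 = [] := by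
      rw [PySem.List.pyRange_one]
      have : ((pt.length : Int) - ((cnt : Int) + 1)).toNat = 0 := by rw [hptlen]; omega
      simp [this]
    rw [hcons, hnil]
    simp only [solveLoopA, loopB]
    by_cases hb : (cnt : Int) * 3 > m
    · rw [if_pos hb, if_pos (by omega)]
    · rw [if_neg hb, if_neg (by omega)]
      rw [show m - (cnt : Int) * 3 = m - 3 * (cnt : Int) by ring,
          hcand (m - 3 * (cnt : Int)) (by omega)]
      split_ifs with h <;> omega
  | cons x r ih =>
    intro cnt ans hdrop hle
    have hlt : cnt < three.length := by
      by_contra h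
      rw [List.drop_eq_nil_iff.mpr (by omega)] at hdrop
      exact absurd hdrop (by simp)
    have hcons : PySem.List.pyRange (cnt : Int) (pt.length : Int) 1
        = (cnt : Int) :: PySem.List.pyRange ((cnt : Int) + 1) (pt.length : Int) 1 := by
      exact PySem.List.pyRange_one_cons (by rw [hptlen]; omega)
    rw [hcons]
    simp only [solveLoopA, loopB]
    by_cases hb : (cnt : Int) * 3 > m
    · rw [if_pos hb, if_pos (by omega)]
    · rw [if_neg hb, if_neg (by omega)]
      have hx : three[cnt] = x := by
        have h0 : three[cnt + 0]? = some x := by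
          rw [← List.getElem?_drop, hdrop]
          rfl
        rw [Nat.add_zero, List.getElem?_eq_getElem hlt] at h0
        exact Option.some.inj h0
      have hsucc : PySem.List.pyGetD pt (((cnt + 1 : Nat) : Int)) 0
          = PySem.List.pyGetD pt ((cnt : Int)) 0 + x.2 := by
        rw [hget (cnt + 1) (by omega), hget cnt (by omega)]
        rw [List.sum_take_succ _ _ (by simpa using hlt)]
        simp [hx]
      have hdrop' : three.drop (cnt + 1) = r := by
        rw [← List.drop_drop, hdrop]
        rfl
      have hrec := ih (cnt + 1)
          (if PySem.List.pyGetD pt (cnt : Int) 0 + fiveScan (m - 3 * (cnt : Int)) five > ans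
            then PySem.List.pyGetD pt (cnt : Int) 0 + fiveScan (m - 3 * (cnt : Int)) five else ans)
          hdrop' (by omega)
      rw [hsucc] at hrec
      push_cast at hrec
      rw [show m - (cnt : Int) * 3 = m - 3 * (cnt : Int) by ring,
          hcand (m - 3 * (cnt : Int)) (by omega)]
      rw [show m - 3 * ((cnt : Int) + 1) = m - 3 * (cnt : Int) - 3 by ring] at hrec
      rw [← hrec]
      congr 1
      · omega

-- ===== VERDICT (by name: the statement is the Claim_ definition above) =====
theorem solve_spec : Claim_equal_solve := by
  intro n m three five _
  unfold Spec_solve solve solve_alt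
  rw [foldA_eq three [(0 : Int)] 0 (by simp) (by simp),
      foldA_eq five [(0 : Int)] 0 (by simp) (by simp)]
  have h0 : ([(0 : Int)] : List Int) ++ prefList three 0 = (0 : Int) :: prefList three 0 := by simp
  have h1 : ([(0 : Int)] : List Int) ++ prefList five 0 = (0 : Int) :: prefList five 0 := by simp
  rw [h0, h1]
  have := loop_eq m three five three 0 0 (by simp) (by simp)
  simpa [PySem.List.pyGetD_natCast] using this
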